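-- pv_equiv track=rewrite | github.com/TomasVenkrbec/lazyline | tests/_spicy_constructs.py | exception_heavy
-- ===== SOURCE A (Python) =====
-- def exception_heavy(n: int = 10) -> int:
--     """Function that uses exceptions for control flow."""
--     total = 0
--     for i in range(n):
--         try:
--             if i % 3 == 0:
--                 raise ValueError(i)
--             total += i
--         except ValueError:
--             total -= 1
--     return total
-- ===== SOURCE B (Python) =====
-- def exception_heavy(n: int = 10) -> int:
--     """Closed-form: sum of 0..n-1, minus the multiples of 3 (each replaced by -1)."""
--     if n <= 0:
--         return 0
--     m = (n + 2) // 3          # count of multiples of 3 in range(n)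
--     return n * (n - 1) // 2 - 3 * m * (m - 1) // 2 - m
-- ===== Notes on version B (the rewrite author's own statement) =====
-- stated objective: faster
-- what changed: Replaced the exception-driven per-element loop with an O(1) closed-form using triangular-number sums and the count of multiples of 3 below n.
import Mathlib
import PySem

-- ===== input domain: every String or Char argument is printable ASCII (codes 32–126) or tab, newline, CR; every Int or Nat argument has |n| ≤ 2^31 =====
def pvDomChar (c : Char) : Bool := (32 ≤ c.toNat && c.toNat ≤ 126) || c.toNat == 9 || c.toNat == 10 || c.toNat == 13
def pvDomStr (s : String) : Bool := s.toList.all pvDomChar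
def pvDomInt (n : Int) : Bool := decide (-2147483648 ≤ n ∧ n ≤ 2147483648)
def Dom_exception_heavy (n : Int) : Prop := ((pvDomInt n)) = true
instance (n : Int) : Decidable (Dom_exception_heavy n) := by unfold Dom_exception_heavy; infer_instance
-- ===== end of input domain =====

-- B replaces A's exception-driven O(n) loop by an O(1) closed-form (triangular-number) formula.

-- ===== PORT A =====
-- for i in range(n): if i % 3 == 0 then (raise → total -= 1) else total += i
def exception_heavy (n : Int) : Int :=
  (PySem.List.pyRange 0 n 1).foldl
    (fun total i => if PySem.Int.mod i 3 = 0 then total - 1 else total + i) 0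

-- ===== PORT B =====
def exception_heavy_alt (n : Int) : Int :=
  if n ≤ 0 then 0
  else
    let m := PySem.Int.floordiv (n + 2) 3
    PySem.Int.floordiv (n * (n - 1)) 2 - PySem.Int.floordiv (3 * m * (m - 1)) 2 - m

-- ===== PRECONDITION & SPEC =====
def Spec_exception_heavy (n : Int) (out : Int) : Prop := out = exception_heavy_alt n
instance (n : Int) (out : Int) : Decidable (Spec_exception_heavy n out) := by unfold Spec_exception_heavy; infer_instance

-- ===== CLAIM (what is proved, stated in full; the proofs are below) =====
def Claim_equal_exception_heavy : Prop := ∀ (n : Int), Dom_exception_heavy n → Spec_exception_heavy n (exception_heavy n)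

-- ===== LEMMAS AND PROOFS =====

-- division-free closed form per residue class mod 3 (q := k / 3)
def pvF (k : Int) : Int :=
  if k % 3 = 0 then 3*(k/3)*(k/3) - k/3
  else if k % 3 = 1 then 3*(k/3)*(k/3) - k/3 - 1
  else 3*(k/3)*(k/3) + 2*(k/3)

theorem pvLoop (k : Nat) :
    (PySem.List.pyRange 0 (k : Int) 1).foldl
      (fun total i => if PySem.Int.mod i 3 = 0 then total - 1 else total + i) 0 = pvF k := by
  induction k with
  | zero => simp [PySem.List.pyRange_one_eq_nil, pvF]
  | succ k ih =>
    rw [show ((k + 1 : Nat) : Int) = (k : Int) + 1 by push_cast; ring,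
        PySem.List.pyRange_one_succ_right (by positivity), List.foldl_append, ih]
    simp only [List.foldl_cons, List.foldl_nil]
    rw [PySem.Int.mod_eq_emod_of_pos (by norm_num : (0:Int) < 3)]
    set K : Int := (k : Int) with hK
    obtain ⟨q, r, hqr, hr0, hr3⟩ : ∃ q r : Int, K = 3*q + r ∧ 0 ≤ r ∧ r < 3 :=
      ⟨K / 3, K % 3, by omega, by omega, by omega⟩
    unfold pvF
    have hsq : 3*(q+1)*(q+1) = 3*(q*q) + 6*q + 3 := by ring
    have hsq' : 3*q*q = 3*(q*q) := by ring
    interval_cases r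
    · have h1 : K % 3 = 0 := by omega
      have h2 : K / 3 = q := by omega
      have h3 : (K+1) % 3 = 1 := by omega
      have h4 : (K+1) / 3 = q := by omega
      rw [if_pos h1, h2, h3, h4]
      norm_num
      omega
    · have h1 : K % 3 = 1 := by omega
      have h2 : K / 3 = q := by omega
      have h3 : (K+1) % 3 = 2 := by omega
      have h4 : (K+1) / 3 = q := by omega
      rw [if_neg (by omega : ¬ K % 3 = 0), h1, h2, h3, h4]
      norm_num
      omega
    · have h1 : K % 3 = 2 := by omega
      have h2 : K / 3 = q := by omega
      have h3 : (K+1) % 3 = 0 := by omega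
      have h4 : (K+1) / 3 = q + 1 := by omega
      rw [if_neg (by omega : ¬ K % 3 = 0), h3, h4, h1, h2]
      norm_num
      omega

-- (9p-3q)/2 - (3p-3q)/2 = 3p for every p q (parity case split), etc.: used via ring-normalised haves
theorem pvAlt_eq (k : Nat) (hk : 0 < (k:Int)) : exception_heavy_alt (k : Int) = pvF (k : Int) := by
  unfold exception_heavy_alt
  rw [if_neg (by omega)]
  simp only [PySem.Int.floordiv_eq_ediv_of_pos (by norm_num : (0:Int) < 3),
      PySem.Int.floordiv_eq_ediv_of_pos (by norm_num : (0:Int) < 2)]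
  set K : Int := (k : Int) with hK
  obtain ⟨q, r, hqr, hr0, hr3⟩ : ∃ q r : Int, K = 3*q + r ∧ 0 ≤ r ∧ r < 3 :=
    ⟨K / 3, K % 3, by omega, by omega, by omega⟩
  unfold pvF
  obtain ⟨p, hp⟩ : ∃ p : Int, p = q * q := ⟨q*q, rfl⟩
  interval_cases r
  · have hm : (K + 2) / 3 = q := by omega
    have h2 : K / 3 = q := by omega
    have e1 : K * (K - 1) = 9*p - 3*q := by rw [hp]; nlinarith [hqr]
    have e2 : 3 * q * (q - 1) = 3*p - 3*q := by rw [hp]; ring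
    rw [if_pos (by omega : K % 3 = 0), hm, e1, e2, h2]
    have e3 : 3*q*q = 3*p := by rw [hp]; ring
    rw [e3]
    omega
  · have hm : (K + 2) / 3 = q + 1 := by omega
    have h2 : K / 3 = q := by omega
    have e1 : K * (K - 1) = 9*p + 3*q := by rw [hp]; nlinarith [hqr]
    have e2 : 3 * (q+1) * (q+1 - 1) = 3*p + 3*q := by rw [hp]; ring
    rw [if_neg (by omega : ¬ K % 3 = 0), if_pos (by omega : K % 3 = 1), hm, e1, e2, h2]
    have e3 : 3*q*q = 3*p := by rw [hp]; ring
    rw [e3]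
    omega
  · have hm : (K + 2) / 3 = q + 1 := by omega
    have h2 : K / 3 = q := by omega
    have e1 : K * (K - 1) = 9*p + 9*q + 2 := by rw [hp]; nlinarith [hqr]
    have e2 : 3 * (q+1) * (q+1 - 1) = 3*p + 3*q := by rw [hp]; ring
    rw [if_neg (by omega : ¬ K % 3 = 0), if_neg (by omega : ¬ K % 3 = 1), hm, e1, e2, h2]
    have e3 : 3*q*q = 3*p := by rw [hp]; ring
    rw [e3]
    omega

theorem exception_heavy_eq (n : Int) : exception_heavy n = exception_heavy_alt n := by
  by_cases h : n ≤ 0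
  · unfold exception_heavy exception_heavy_alt
    simp [h, PySem.List.pyRange_one_eq_nil h]
  · have hn : n = (n.toNat : Int) := by omega
    rw [hn, exception_heavy, pvLoop, pvAlt_eq _ (by omega)]

-- ===== VERDICT (by name: the statement is the Claim_ definition above) =====
theorem exception_heavy_spec : Claim_equal_exception_heavy := by
  intro n _
  unfold Spec_exception_heavy
  exact exception_heavy_eq n
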